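-- pv_equiv track=rewrite | github.com/jq-ding/VesselSegmantation | merge.py | delete_circle
-- ===== SOURCE A (Python) =====
-- def delete_circle(img):
--
--     rowNum = len(img)     #gao and hang
--     colNum = len(img[0])  #kuan and lie
--
--     for i in range(rowNum):
--         for j in range(colNum):
--             if img[i][j] == 255:
--                 img[i][j] = 0
--     for i in range(rowNum):
--         for j in range(colNum):
--             img[i][j] *=255
--     return img
-- ===== SOURCE B (Python) =====
-- def delete_circle(img):
--     # Column-major sweep: zip(*img) yields the image's columns; each pixel is
--     # rewritten in place in one pass (255 -> 0, anything else scaled by 255).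
--     for j, col in enumerate(zip(*img)):
--         for i, v in enumerate(col):
--             img[i][j] = 0 if v == 255 else 255 * v
--     return img
-- ===== Notes on version B (the rewrite author's own statement) =====
-- stated objective: alternative
-- what changed: Replaces A's two row-major index passes (zero out 255s over the whole matrix, then scale everything by 255) with a single column-major sweep: iterate over the columns produced by zip(*img) and rewrite each cell in place with '0 if v==255 else 255*v'.
import Mathlib
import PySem

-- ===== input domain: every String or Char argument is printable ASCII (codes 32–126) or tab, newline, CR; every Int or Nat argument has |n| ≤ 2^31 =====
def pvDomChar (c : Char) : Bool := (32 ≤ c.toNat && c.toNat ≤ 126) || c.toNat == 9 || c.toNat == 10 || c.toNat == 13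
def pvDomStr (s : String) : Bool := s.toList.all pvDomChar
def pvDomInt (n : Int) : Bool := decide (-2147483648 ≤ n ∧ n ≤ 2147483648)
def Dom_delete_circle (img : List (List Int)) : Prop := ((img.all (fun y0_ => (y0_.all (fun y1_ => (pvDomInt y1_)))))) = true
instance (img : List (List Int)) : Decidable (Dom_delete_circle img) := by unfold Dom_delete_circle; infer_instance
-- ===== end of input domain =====

-- B replaces A's two row-major index passes with one column-major in-place sweep over
-- zip(*img) (objective: alternative). Both mutate img's rows in place and return img.

-- ===== PORT A =====
-- pyGetD/pySetD totalize img[i]/img[i][j]; they are exact here because Pre_ keeps every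
-- index of range(rowNum)/range(colNum) in range.
def delete_circle (img : List (List Int)) : List (List Int) :=
  let rowNum : Int := img.length
  let colNum : Int := ((PySem.List.pyGet? img 0).getD []).length
  let img1 := (PySem.List.pyRange 0 rowNum 1).foldl (fun m i =>
      (PySem.List.pyRange 0 colNum 1).foldl (fun m' j =>
        if PySem.List.pyGetD (PySem.List.pyGetD m' i []) j 0 = 255 then
          PySem.List.pySetD m' i (PySem.List.pySetD (PySem.List.pyGetD m' i []) j 0)
        else m') m) img
  (PySem.List.pyRange 0 rowNum 1).foldl (fun m i =>
      (PySem.List.pyRange 0 colNum 1).foldl (fun m' j =>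
        PySem.List.pySetD m' i (PySem.List.pySetD (PySem.List.pyGetD m' i []) j
          (PySem.List.pyGetD (PySem.List.pyGetD m' i []) j 0 * 255))) m) img1

-- ===== PORT B =====
-- zip(*img): the list of columns, truncated at the shortest row (Python's zip).
-- Python's zip is lazy, but each column tuple is read before any cell of that column
-- (or of a later one) is written, so materializing all columns up front is exact.
def pvZip (rows : List (List Int)) : List (List Int) :=
  if h : rows.isEmpty || rows.any (fun r => r.isEmpty) then []
  else (rows.map (fun r => r.headD 0)) :: pvZip (rows.map List.tail)
  termination_by (rows.headD []).length
  decreasing_by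
    simp only [Bool.or_eq_true, List.isEmpty_iff, List.any_eq_true, not_or] at h
    cases rows with
    | nil => exact absurd rfl h.1
    | cons r rs =>
      have hr : r ≠ [] := fun h0 => h.2 ⟨r, by simp, h0⟩
      simp only [List.headD_cons]
      cases r with
      | nil => exact absurd rfl hr
      | cons a as => simp

def delete_circle_alt (img : List (List Int)) : List (List Int) :=
  (PySem.List.enumerate (pvZip img) 0).foldl (fun m jc =>
    (PySem.List.enumerate jc.2 0).foldl (fun m' iv =>
      PySem.List.pySetD m' iv.1
        (PySem.List.pySetD (PySem.List.pyGetD m' iv.1 []) jc.1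
          (if iv.2 = 255 then 0 else 255 * iv.2))) m) img

-- ===== PRECONDITION & SPEC =====
-- Pre_ excludes exactly the inputs where A raises IndexError: the empty image
-- (img[0] fails) and images with a row shorter than the first row (img[i][j] fails).
def Pre_delete_circle (img : List (List Int)) : Prop :=
  img ≠ [] ∧ ∀ r ∈ img, (img.headD []).length ≤ r.length
instance (img : List (List Int)) : Decidable (Pre_delete_circle img) := by
  unfold Pre_delete_circle; infer_instance
def pvWitness_delete_circle : List (List Int) := [[255, 1], [2, 3]]

def Spec_delete_circle (img : List (List Int)) (out : List (List Int)) : Prop := out = delete_circle_alt img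
instance (img : List (List Int)) (out : List (List Int)) : Decidable (Spec_delete_circle img out) := by unfold Spec_delete_circle; infer_instance

-- ===== CLAIM (what is proved, stated in full; the proofs are below) =====
def Claim_equal_delete_circle : Prop := ∀ (img : List (List Int)), Dom_delete_circle img → Pre_delete_circle img → Spec_delete_circle img (delete_circle img)

-- ===== LEMMAS AND PROOFS =====

-- Setting an in-range position to the value already there is the identity.
theorem pv_set_getD_self {α : Type} (r : List α) (j : Nat) (d : α) (h : j < r.length) :
    r.set j (r.getD j d) = r := by
  rw [List.getD_eq_getElem r d h, List.set_getElem_self]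

-- Setting at or past the length of the left part of an append edits the right part.
theorem pv_set_append_ge {α : Type} (a : List α) (b : List α) (n : Nat) (v : α)
    (h : a.length ≤ n) : (a ++ b).set n v = a ++ b.set (n - a.length) v := by
  induction a generalizing n with
  | nil => simp
  | cons x xs ih =>
    cases n with
    | zero => simp at h
    | succ n => simp [ih n (by simpa using h)]

-- A left fold of in-place point updates over range c maps the first c cells.
theorem pv_row_fold {α : Type} (d : α) (φ : α → α) (s : List α → Nat → List α)
    (hs : ∀ r j, j < r.length → s r j = r.set j (φ (r.getD j d))) :
    ∀ (c : Nat) (r : List α), c ≤ r.length →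
      (List.range c).foldl s r = (r.take c).map φ ++ r.drop c := by
  intro c
  induction c with
  | zero => intro r _; simp
  | succ c ih =>
    intro r hc
    have hcr : c < r.length := by omega
    rw [List.range_succ, List.foldl_append, ih r (by omega)]
    simp only [List.foldl_cons, List.foldl_nil]
    set X := (r.take c).map φ ++ r.drop c with hX
    have hlenL : ((r.take c).map φ).length = c := by
      simp [List.length_take]; omega
    have hXlen : X.length = r.length := by
      simp [hX, List.length_take]; omega
    have hXc : X.getD c d = r.getD c d := by
      rw [List.getD_eq_getElem?_getD, List.getD_eq_getElem?_getD, hX,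
          List.getElem?_append_right (by omega), hlenL, Nat.sub_self, List.getElem?_drop]
      simp
    rw [hs X c (by omega), hXc, hX, pv_set_append_ge _ _ _ _ (by omega), hlenL,
        Nat.sub_self, List.drop_eq_getElem_cons hcr]
    simp only [List.set_cons_zero]
    rw [List.take_add_one, List.getElem?_eq_getElem hcr, List.getD_eq_getElem r d hcr]
    have htk : List.take (c + 1) (List.map φ r) = List.take c (List.map φ r) ++ [φ r[c]] := by
      rw [List.take_add_one]
      simp [List.getElem?_eq_getElem (show c < (List.map φ r).length by simpa using hcr)]
    simp [htk]

-- An inner fold that only edits row i of the matrix is a fold on that row.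
theorem pv_mat_fold (i : Nat) (T : List Int → Nat → List Int)
    (S : List (List Int) → Nat → List (List Int))
    (hS : ∀ m j, i < m.length → S m j = m.set i (T (m.getD i []) j)) :
    ∀ (c : Nat) (m : List (List Int)), i < m.length →
      (List.range c).foldl S m = m.set i ((List.range c).foldl T (m.getD i [])) := by
  intro c
  induction c with
  | zero =>
    intro m hi
    simp only [List.range_zero, List.foldl_nil]
    exact (pv_set_getD_self m i [] hi).symm
  | succ c ih =>
    intro m hi
    rw [List.range_succ, List.foldl_append, ih m hi]
    simp only [List.foldl_cons, List.foldl_nil]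
    rw [hS _ c (by simpa using hi)]
    have h1 : (m.set i ((List.range c).foldl T (m.getD i []))).getD i []
        = (List.range c).foldl T (m.getD i []) := by
      rw [List.getD_eq_getElem _ [] (by simpa using hi), List.getElem_set_self]
    rw [h1, List.set_set, List.foldl_append]
    simp

-- One full index-loop pass, per-cell row step T realizing φ, over a rectangular matrix is a map.
theorem pv_pass_eq (n cN : Nat) (φ : Int → Int)
    (T : List Int → Nat → List Int)
    (hT : ∀ r j, j < r.length → T r j = r.set j (φ (r.getD j 0)))
    (S : Nat → List (List Int) → Nat → List (List Int))
    (hS : ∀ i m j, i < m.length → S i m j = m.set i (T (m.getD i []) j))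
    (m : List (List Int)) (hn : n = m.length) (hm : ∀ r ∈ m, cN ≤ r.length) :
    (List.range n).foldl (fun a i => (List.range cN).foldl (S i) a) m
      = m.map (fun r => (r.take cN).map φ ++ r.drop cN) := by
  subst hn
  rw [pv_row_fold ([] : List Int) (fun r => (List.range cN).foldl T r)
      (fun a i => (List.range cN).foldl (S i) a)
      (fun a i hi => pv_mat_fold i T (S i) (fun m' j hj => hS i m' j hj) cN a hi)
      m.length m le_rfl]
  simp only [List.take_length, List.drop_length, List.append_nil]
  apply List.map_congr_left
  intro r hr
  exact pv_row_fold (0 : Int) φ T hT cN r (hm r hr)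

-- A characterized: under Pre_, A is the per-row map of '0 if v==255 else v*255' on the
-- first c cells (c = width of the first row).
theorem pv_A_eq (img : List (List Int)) (hpre : Pre_delete_circle img) :
    delete_circle img = img.map (fun r =>
      ((r.take (img.headD []).length).map (fun v => if v = 255 then 0 else v * 255))
        ++ r.drop (img.headD []).length) := by
  obtain ⟨hne, hlen⟩ := hpre
  unfold delete_circle
  rcases img with _ | ⟨r0, rest⟩
  · exact absurd rfl hne
  have hcol : ((PySem.List.pyGet? (r0 :: rest) 0).getD []) = r0 := by
    rw [PySem.List.pyGet?_zero_cons]; rfl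
  have hlen' : ∀ r ∈ (r0 :: rest), r0.length ≤ r.length := by simpa using hlen
  have hT1 : ∀ (r : List Int) (j : Nat), j < r.length →
      (if r.getD j 0 = 255 then r.set j 0 else r)
        = r.set j (if r.getD j 0 = 255 then 0 else r.getD j 0) := by
    intro r j hj; split_ifs with h
    · rfl
    · exact (pv_set_getD_self r j 0 hj).symm
  have hS1 : ∀ (i : Nat) (m : List (List Int)) (j : Nat), i < m.length →
      (if (m.getD i []).getD j 0 = 255 then m.set i ((m.getD i []).set j 0) else m)
        = m.set i (if (m.getD i []).getD j 0 = 255 then (m.getD i []).set j 0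
                   else m.getD i []) := by
    intro i m j hi; split_ifs with h
    · rfl
    · exact (pv_set_getD_self m i [] hi).symm
  simp only [hcol, PySem.List.pyRange_zero_natCast, List.foldl_map,
    PySem.List.pySetD_natCast, PySem.List.pyGetD_natCast, List.headD_cons]
  rw [pv_pass_eq (r0 :: rest).length r0.length (fun v => if v = 255 then 0 else v)
      (fun r j => if r.getD j 0 = 255 then r.set j 0 else r) hT1
      (fun i m' j => if (m'.getD i []).getD j 0 = 255
                     then m'.set i ((m'.getD i []).set j 0) else m')
      hS1 (r0 :: rest) rfl hlen']
  rw [pv_pass_eq (r0 :: rest).length r0.length (fun v => v * 255)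
      (fun r j => r.set j (r.getD j 0 * 255))
      (fun r j _ => rfl)
      (fun i m' j => m'.set i ((m'.getD i []).set j ((m'.getD i []).getD j 0 * 255)))
      (fun i m j _ => rfl)
      ((r0 :: rest).map (fun r =>
        (r.take r0.length).map (fun v => if v = 255 then 0 else v) ++ r.drop r0.length))
      (by simp)
      (by intro r hr
          simp only [List.mem_map] at hr
          obtain ⟨a, ha, rfl⟩ := hr
          have := hlen' a ha
          simp [List.length_take]
          omega)]
  simp only [List.map_map]
  apply List.map_congr_left
  intro r hr
  have hcle := hlen' r hr
  have hA : ((r.take r0.length).map (fun v : Int => if v = 255 then 0 else v)).length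
      = r0.length := by
    simp [List.length_take]; omega
  simp only [Function.comp_def]
  rw [List.take_left' hA, List.drop_left' hA]
  simp [List.map_map, Function.comp_def, ite_mul]

-- zip(*rows) explicitly: column j holds rows[i][j], for j below the first row's width
-- (which is minimal under the hypotheses).
theorem pv_pvZip_eq : ∀ (c : Nat) (rows : List (List Int)), rows ≠ [] →
    (∀ r ∈ rows, c ≤ r.length) → (rows.headD []).length = c →
    pvZip rows = (List.range c).map (fun j => rows.map (fun r => r.getD j 0)) := by
  intro c
  induction c with
  | zero =>
    intro rows hne _ hhd
    rw [pvZip]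
    rcases rows with _ | ⟨r, rs⟩
    · exact absurd rfl hne
    · simp only [List.headD_cons] at hhd
      have : r.isEmpty := by simpa [List.isEmpty_iff, List.length_eq_zero_iff] using hhd
      simp [this]
  | succ c ih =>
    intro rows hne hall hhd
    rcases rows with _ | ⟨r, rs⟩
    · exact absurd rfl hne
    have hno : ∀ x ∈ (r :: rs), x ≠ [] := by
      intro x hx h0
      have := hall x hx; rw [h0] at this; simp at this
    rw [pvZip]
    have hcond : ¬((r :: rs).isEmpty || (r :: rs).any (fun x => x.isEmpty)) := by
      simp only [Bool.or_eq_true, List.isEmpty_iff, List.any_eq_true, not_or]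
      refine ⟨by simp, ?_⟩
      rintro ⟨x, hx, hemp⟩
      exact hno x hx (by simpa [List.isEmpty_iff] using hemp)
    rw [dif_neg hcond]
    rw [ih ((r :: rs).map List.tail)
        (by simp)
        (by intro t ht
            simp only [List.mem_map] at ht
            obtain ⟨x, hx, rfl⟩ := ht
            have := hall x hx
            simp [List.length_tail]; omega)
        (by simp only [List.map_cons, List.headD_cons, List.length_tail]
            simp only [List.headD_cons] at hhd; omega)]
    have hhead : List.map (fun r : List Int => r.headD 0) (r :: rs)
        = List.map (fun r : List Int => r.getD 0 0) (r :: rs) :=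
      List.map_congr_left (fun x _ => by cases x <;> simp)
    have htail : ∀ j : Nat,
        List.map (fun t : List Int => t.getD j 0) ((r :: rs).map List.tail)
          = List.map (fun x : List Int => x.getD (j + 1) 0) (r :: rs) := by
      intro j
      rw [List.map_map]
      apply List.map_congr_left
      intro x hx
      cases x with
      | nil => exact absurd rfl (hno _ hx)
      | cons a as => simp
    have htail2 : List.map (fun j : Nat =>
          List.map (fun t : List Int => t.getD j 0) ((r :: rs).map List.tail))
            (List.range c)
        = List.map (fun j : Nat =>
          List.map (fun x : List Int => x.getD (j + 1) 0) (r :: rs)) (List.range c) :=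
      List.map_congr_left (fun j _ => htail j)
    rw [hhead, htail2, List.range_succ_eq_map]
    conv_rhs => rw [List.map_cons, List.map_map]
    rfl

-- zipWith over two maps of the same list is a map.
theorem pv_zipWith_map {α β γ δ : Type} (g : β → γ → δ) (f : α → β) (h : α → γ)
    (l : List α) : List.zipWith g (l.map f) (l.map h) = l.map (fun x => g (f x) (h x)) := by
  induction l with
  | nil => rfl
  | cons x xs ih => simp [ih]

-- The inner loop of B (one column): writing cell j of every row, enumerated from k.
theorem pv_inner_fold (j : Nat) (φ : Int → Int) :
    ∀ (col : List Int) (k : Nat) (m : List (List Int)), k + col.length = m.length →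
      (PySem.List.enumerate col (k : Int)).foldl
        (fun m' iv => PySem.List.pySetD m' iv.1
          (PySem.List.pySetD (PySem.List.pyGetD m' iv.1 []) (j : Int) (φ iv.2))) m
      = m.take k ++ List.zipWith (fun r v => r.set j (φ v)) (m.drop k) col := by
  intro col
  induction col with
  | nil =>
    intro k m hk
    simp only [List.length_nil] at hk
    simp only [PySem.List.enumerate_nil, List.foldl_nil, List.zipWith_nil_right,
      List.append_nil]
    rw [List.take_of_length_le (by omega)]
  | cons v vs ih =>
    intro k m hk
    have hkm : k < m.length := by simp at hk; omega
    rw [PySem.List.enumerate_cons, List.foldl_cons]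
    have hcast : (k : Int) + 1 = ((k + 1 : Nat) : Int) := by push_cast; ring
    rw [hcast]
    set row' := (m.getD k []).set j (φ v) with hrow
    have hstep : PySem.List.pySetD m (k : Int)
        (PySem.List.pySetD (PySem.List.pyGetD m (k : Int) []) (j : Int) (φ v))
        = m.set k row' := by
      simp [PySem.List.pySetD_natCast, PySem.List.pyGetD_natCast, hrow]
    rw [hstep, ih (k + 1) (m.set k row') (by simp at hk ⊢; omega)]
    have hdrop : (m.set k row').drop (k + 1) = m.drop (k + 1) := by
      apply List.ext_getElem
      · simp
      · intro n h1 h2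
        simp [List.getElem_drop, Nat.ne_of_lt (by omega : k < k + 1 + n)]
    have htake : (m.set k row').take (k + 1) = m.take k ++ [row'] := by
      rw [List.take_set]
      have h1 : m.take (k + 1) = m.take k ++ [m[k]] := by
        rw [List.take_add_one]; simp [List.getElem?_eq_getElem hkm]
      rw [h1, pv_set_append_ge _ _ _ _ (by simp [List.length_take])]
      simp [List.length_take, Nat.min_eq_left (le_of_lt hkm)]
    rw [hdrop, htake, List.drop_eq_getElem_cons hkm, List.zipWith_cons_cons,
        List.append_assoc, List.singleton_append]
    congr 2
    rw [hrow, List.getD_eq_getElem m [] hkm]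

-- One in-place cell update turns the j-processed row into the (j+1)-processed row.
theorem pv_row_step (φ : Int → Int) (r : List Int) (j : Nat) (hj : j < r.length) :
    ((r.take j).map φ ++ r.drop j).set j (φ (r.getD j 0))
      = (r.take (j + 1)).map φ ++ r.drop (j + 1) := by
  have hlenL : ((r.take j).map φ).length = j := by simp [List.length_take]; omega
  rw [pv_set_append_ge _ _ _ _ (by omega), hlenL, Nat.sub_self,
      List.drop_eq_getElem_cons hj]
  simp only [List.set_cons_zero]
  rw [List.getD_eq_getElem r 0 hj]
  have htk : List.take (j + 1) r = List.take j r ++ [r[j]] := by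
    rw [List.take_add_one]
    simp [List.getElem?_eq_getElem hj]
  rw [htk, List.map_append, List.append_assoc]
  simp

-- B's column-major double loop over the explicit columns is the same per-row map.
theorem pv_B_fold (φ : Int → Int) :
    ∀ (c : Nat) (img : List (List Int)), (∀ r ∈ img, c ≤ r.length) →
      (List.range c).foldl (fun m (j : Nat) =>
        (PySem.List.enumerate (img.map (fun r => r.getD j 0))).foldl
          (fun m' iv => PySem.List.pySetD m' iv.1
            (PySem.List.pySetD (PySem.List.pyGetD m' iv.1 []) (j : Int) (φ iv.2))) m) img
      = img.map (fun r => (r.take c).map φ ++ r.drop c) := by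
  intro c
  induction c with
  | zero =>
    intro img _
    simp only [List.range_zero, List.foldl_nil, List.take_zero, List.map_nil,
      List.nil_append, List.drop_zero]
    exact (List.map_id' img).symm
  | succ c ih =>
    intro img hc
    rw [List.range_succ, List.foldl_append, ih img (fun r hr => by have := hc r hr; omega)]
    simp only [List.foldl_cons, List.foldl_nil]
    have hinner := pv_inner_fold c φ (img.map (fun r => r.getD c 0)) 0
        (img.map (fun r => (r.take c).map φ ++ r.drop c)) (by simp)
    simp only [Nat.cast_zero] at hinner
    rw [hinner]
    simp only [List.take_zero, List.drop_zero, List.nil_append]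
    rw [pv_zipWith_map]
    apply List.map_congr_left
    intro r hr
    exact pv_row_step φ r c (by have := hc r hr; omega)

-- B characterized: the same per-row map.
theorem pv_B_eq (img : List (List Int)) (hpre : Pre_delete_circle img) :
    delete_circle_alt img = img.map (fun r =>
      ((r.take (img.headD []).length).map (fun v => if v = 255 then 0 else 255 * v))
        ++ r.drop (img.headD []).length) := by
  obtain ⟨hne, hlen⟩ := hpre
  unfold delete_circle_alt
  set c := (img.headD []).length with hc
  rw [pv_pvZip_eq c img hne hlen rfl]
  rw [PySem.List.enumerate_eq_map_pyRange _ ([] : List Int)]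
  simp only [PySem.List.len, List.length_map, List.length_range,
    PySem.List.pyRange_zero_natCast, List.foldl_map]
  have hgen : ∀ (k : Nat), k ∈ List.range c →
      PySem.List.pyGetD ((List.range c).map (fun j => img.map (fun r => r.getD j 0)))
        ((k : Nat) : Int) [] = img.map (fun r => r.getD k 0) := by
    intro k hk
    have hkc : k < c := List.mem_range.mp hk
    rw [PySem.List.pyGetD_natCast, List.getD_eq_getElem _ [] (by simpa using hkc)]
    simp
  have hcongr := PySem.List.foldl_congr_mem (List.range c)
    (fun (m : List (List Int)) (j : Nat) =>
      (PySem.List.enumerate (PySem.List.pyGetD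
          ((List.range c).map (fun j => img.map (fun r => r.getD j 0))) (j : Int) [])).foldl
        (fun m' iv => PySem.List.pySetD m' iv.1
          (PySem.List.pySetD (PySem.List.pyGetD m' iv.1 []) (j : Int)
            (if iv.2 = 255 then 0 else 255 * iv.2))) m)
    (fun (m : List (List Int)) (j : Nat) =>
      (PySem.List.enumerate (img.map (fun r => r.getD j 0))).foldl
        (fun m' iv => PySem.List.pySetD m' iv.1
          (PySem.List.pySetD (PySem.List.pyGetD m' iv.1 []) (j : Int)
            (if iv.2 = 255 then 0 else 255 * iv.2))) m)
    img (by intro acc x hx; dsimp only; rw [hgen x hx])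
  exact hcongr.trans (pv_B_fold (fun v => if v = 255 then 0 else 255 * v) c img hlen)

-- ===== VERDICT (by name: the statement is the Claim_ definition above) =====
theorem delete_circle_spec : Claim_equal_delete_circle := by
  intro img hdom hpre
  unfold Spec_delete_circle
  rw [pv_A_eq img hpre, pv_B_eq img hpre]
  apply List.map_congr_left
  intro r _
  congr 1
  apply List.map_congr_left
  intro v _
  rcases eq_or_ne v 255 with h | h <;> simp [h, Int.mul_comm]
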